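-- pv_equiv track=rewrite | github.com/nehemiahlc/DSA-practice | two_pointers/reverse_case_match.py | reverse_case_match
-- ===== SOURCE A (Python) =====
-- def reverse_case_match(s):
--   l, r = 0, len(s) - 1
--   while l < len(s) and r >= 0:
--     if not s[l].islower():
--       l += 1
--     elif not s[r].isupper():
--       r -= 1
--     else:
--       if s[l] != s[r].lower():
--         return False
--       l += 1
--       r -= 1
--   return True
-- ===== SOURCE B (Python) =====
-- def reverse_case_match(s):
--     lowers = [c for c in s if c.islower()]
--     uppers = [c for c in s if c.isupper()]
--     for a, b in zip(lowers, reversed(uppers)):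
--         if a != b.lower():
--             return False
--     return True
-- ===== Notes on version B (the rewrite author's own statement) =====
-- stated objective: simpler
-- what changed: Replaces the interleaved in-place two-pointer scan with two filtering passes (lowercase chars left-to-right, uppercase chars right-to-left) and a single zipped comparison truncated to the shorter list.
import Mathlib
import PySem

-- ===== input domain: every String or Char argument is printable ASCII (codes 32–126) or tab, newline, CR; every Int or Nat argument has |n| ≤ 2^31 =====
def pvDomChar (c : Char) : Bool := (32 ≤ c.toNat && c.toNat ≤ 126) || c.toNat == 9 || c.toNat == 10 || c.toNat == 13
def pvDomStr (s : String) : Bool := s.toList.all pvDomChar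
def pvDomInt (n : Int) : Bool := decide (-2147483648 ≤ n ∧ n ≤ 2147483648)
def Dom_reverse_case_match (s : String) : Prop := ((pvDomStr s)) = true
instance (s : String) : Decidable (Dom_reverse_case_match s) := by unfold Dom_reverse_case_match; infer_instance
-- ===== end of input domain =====

-- B replaces A's interleaved two-pointer scan with two filtering passes and one zipped
-- comparison (same O(n) cost, simpler decomposition); return values proved equal on all inputs.

-- ===== PORT A =====
-- the while loop of A: l moves right, r moves left; s[l]/s[r] are always in range when read
def reverse_case_match_loop (cs : List Char) (l : Nat) (r : Int) : Bool :=
  if h : l < cs.length ∧ 0 ≤ r then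
    if ¬ (PySem.Chars.islower (cs.getD l ' ') = true) then
      reverse_case_match_loop cs (l + 1) r
    else if ¬ (PySem.Chars.isupper (cs.getD r.toNat ' ') = true) then
      reverse_case_match_loop cs l (r - 1)
    else
      if cs.getD l ' ' ≠ PySem.Chars.lowerChar (cs.getD r.toNat ' ') then false
      else reverse_case_match_loop cs (l + 1) (r - 1)
  else true
termination_by (cs.length - l) + (r + 1).toNat
decreasing_by all_goals omega

def reverse_case_match (s : String) : Bool :=
  reverse_case_match_loop s.toList 0 ((s.toList.length : Int) - 1)

-- ===== PORT B =====
def reverse_case_match_alt (s : String) : Bool :=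
  let lowers := s.toList.filter PySem.Chars.islower
  let uppers := s.toList.filter PySem.Chars.isupper
  (lowers.zip uppers.reverse).all (fun p => p.1 == PySem.Chars.lowerChar p.2)

-- ===== PRECONDITION & SPEC =====
def Spec_reverse_case_match (s : String) (out : Bool) : Prop := out = reverse_case_match_alt s
instance (s : String) (out : Bool) : Decidable (Spec_reverse_case_match s out) := by unfold Spec_reverse_case_match; infer_instance

-- ===== CLAIM (what is proved, stated in full; the proofs are below) =====
def Claim_equal_reverse_case_match : Prop := ∀ (s : String), Dom_reverse_case_match s → Spec_reverse_case_match s (reverse_case_match s)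

-- ===== LEMMAS AND PROOFS =====
-- invariant: the loop compares the lowercase chars of the unread right part (drop l) against
-- the reversed uppercase chars of the unread left part (take (r+1))
theorem reverse_case_match_loop_eq (cs : List Char) (l : Nat) (r : Int) :
    reverse_case_match_loop cs l r =
      (((cs.drop l).filter PySem.Chars.islower).zip
        (((cs.take (r + 1).toNat).filter PySem.Chars.isupper).reverse)).all
        (fun p => p.1 == PySem.Chars.lowerChar p.2) := by
  induction l, r using reverse_case_match_loop.induct cs with
  | case1 l r h hlow ih =>
    -- s[l] is not lowercase: it is filtered away from the left side
    rw [reverse_case_match_loop, dif_pos h, if_pos hlow, ih]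
    have hl : l < cs.length := h.1
    rw [List.getD_eq_getElem cs ' ' hl] at hlow
    rw [List.drop_eq_getElem_cons hl, List.filter_cons]
    simp [hlow]
  | case2 l r h hlow hup ih =>
    -- s[r] is not uppercase: it is filtered away from the right side
    have hr1 : ((r - 1) + 1).toNat = r.toNat := by omega
    rw [hr1] at ih
    rw [reverse_case_match_loop, dif_pos h, if_neg hlow, if_pos hup, ih]
    by_cases hr : r.toNat < cs.length
    · have ht : (r + 1).toNat = r.toNat + 1 := by omega
      rw [List.getD_eq_getElem cs ' ' hr] at hup
      rw [ht, List.take_add_one, List.getElem?_eq_getElem hr, Option.toList_some, List.filter_append,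
        List.filter_cons, if_neg hup, List.filter_nil, List.append_nil]
    · have h1 : cs.length ≤ (r + 1).toNat := by omega
      have h2 : cs.length ≤ r.toNat := by omega
      rw [List.take_of_length_le h1, List.take_of_length_le h2]
  | case3 l r h hlow hup hne =>
    -- mismatching pair: both sides return False
    rw [reverse_case_match_loop, dif_pos h, if_neg hlow, if_neg hup, if_pos hne]
    have hl : l < cs.length := h.1
    have hr : r.toNat < cs.length := by
      by_contra hge
      rw [List.getD_eq_default] at hup
      · exact hup (by decide)
      · omega
    rw [List.getD_eq_getElem cs ' ' hl] at hlow hne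
    rw [List.getD_eq_getElem cs ' ' hr] at hup hne
    have ht : (r + 1).toNat = r.toNat + 1 := by omega
    simp only [not_not] at hlow hup
    rw [List.drop_eq_getElem_cons hl, ht, List.take_add_one, List.getElem?_eq_getElem hr]
    simp only [List.filter_append, List.filter_cons, hlow, hup, if_pos, List.filter_nil,
      Option.toList_some, List.reverse_append, List.reverse_cons, List.reverse_nil,
      List.nil_append, List.cons_append, List.zip_cons_cons, List.all_cons]
    rw [beq_eq_false_iff_ne.mpr hne, Bool.false_and]
  | case4 l r h hlow hup heq ih =>
    -- matching pair: one pair consumed on both sides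
    have hr1 : ((r - 1) + 1).toNat = r.toNat := by omega
    rw [hr1] at ih
    rw [reverse_case_match_loop, dif_pos h, if_neg hlow, if_neg hup, if_neg heq, ih]
    have hl : l < cs.length := h.1
    have hr : r.toNat < cs.length := by
      by_contra hge
      rw [List.getD_eq_default] at hup
      · exact hup (by decide)
      · omega
    simp only [not_not] at hlow hup heq
    rw [List.getD_eq_getElem cs ' ' hl] at hlow heq
    rw [List.getD_eq_getElem cs ' ' hr] at hup heq
    have ht : (r + 1).toNat = r.toNat + 1 := by omega
    rw [List.drop_eq_getElem_cons hl, ht, List.take_add_one, List.getElem?_eq_getElem hr]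
    simp only [List.filter_append, List.filter_cons, hlow, hup, if_pos, List.filter_nil,
      Option.toList_some, List.reverse_append, List.reverse_cons, List.reverse_nil,
      List.nil_append, List.cons_append, List.zip_cons_cons, List.all_cons]
    rw [beq_iff_eq.mpr heq, Bool.true_and]
  | case5 l r h =>
    -- loop exit: at least one side of the zip is empty
    rw [reverse_case_match_loop, dif_neg h]
    rcases not_and_or.mp h with hl | hr
    · have : cs.length ≤ l := by omega
      rw [List.drop_eq_nil_of_le this]
      simp
    · have : (r + 1).toNat = 0 := by omega
      rw [this]
      simp

-- ===== VERDICT (by name: the statement is the Claim_ definition above) =====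
theorem reverse_case_match_spec : Claim_equal_reverse_case_match := by
  intro s _
  unfold Spec_reverse_case_match reverse_case_match reverse_case_match_alt
  rw [reverse_case_match_loop_eq]
  have h : ((s.toList.length : Int) - 1 + 1).toNat = s.toList.length := by omega
  simp only [h, List.drop_zero, List.take_length]
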